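-- pv_equiv track=rewrite | github.com/brooke-hansen/hello | week5practice/firstletters.py | first_letters
-- ===== SOURCE A (Python) =====
-- def first_letters(sentence):
--     start_lett = ''
--     letters = ''
--     for letter in sentence:
--         if letter == " " or letter == '.':
--            if start_lett:
--                letters += start_lett[0]
--                start_lett = ''
--         else:
--             start_lett += letter
--     if start_lett:
--         letters += start_lett[0]
--     return letters
-- ===== SOURCE B (Python) =====
-- import re
--
-- def first_letters(sentence):
--     return ''.join(w[0] for w in re.split(r'[ .]', sentence) if w)
-- ===== Notes on version B (the rewrite author's own statement) =====
-- stated objective: idiomatic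
-- what changed: Replaces the character-by-character accumulate/flush state machine with tokenize-then-map: re.split on the delimiter set [ .] (C-level scan) and join the first character of each non-empty token.
import Mathlib
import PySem

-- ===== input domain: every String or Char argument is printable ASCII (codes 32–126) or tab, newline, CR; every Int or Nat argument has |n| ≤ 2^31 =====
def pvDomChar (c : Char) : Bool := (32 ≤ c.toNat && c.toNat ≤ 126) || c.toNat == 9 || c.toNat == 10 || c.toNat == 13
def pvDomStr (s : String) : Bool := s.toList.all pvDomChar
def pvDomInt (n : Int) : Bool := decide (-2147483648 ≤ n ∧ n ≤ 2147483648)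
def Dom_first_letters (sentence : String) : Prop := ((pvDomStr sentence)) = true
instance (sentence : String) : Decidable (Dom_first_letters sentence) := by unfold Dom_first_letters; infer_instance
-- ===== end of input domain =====

-- B replaces A's character-by-character accumulate/flush state machine with
-- tokenize-then-map (split on the delimiter set, take the first char of each
-- non-empty token); objective: idiomatic, same cost.

-- ===== PORT A =====
-- state = (start_lett, letters), as lists of chars
def firstLettersStep (p : List Char × List Char) (c : Char) : List Char × List Char :=
  if c = ' ' ∨ c = '.' then
    match p.1 with
    | [] => ([], p.2)
    | h :: _ => ([], p.2 ++ [h])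
  else (p.1 ++ [c], p.2)

def first_letters (sentence : String) : String :=
  let st := sentence.toList.foldl firstLettersStep ([], [])
  match st.1 with
  | [] => String.mk st.2
  | h :: _ => String.mk (st.2 ++ [h])

-- ===== PORT B =====
-- re.split(r'[ .]', s): returns (first token, remaining tokens), empty tokens kept
def splitDelim : List Char → List Char × List (List Char)
  | [] => ([], [])
  | c :: cs =>
    let (t, ts) := splitDelim cs
    if c = ' ' ∨ c = '.' then ([], t :: ts)
    else (c :: t, ts)

-- ''.join(w[0] for w in tokens if w): first char of each non-empty token
def first_letters_alt (sentence : String) : String :=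
  let (t, ts) := splitDelim sentence.toList
  String.mk ((t :: ts).filterMap List.head?)

-- ===== PRECONDITION & SPEC =====
def Spec_first_letters (sentence : String) (out : String) : Prop := out = first_letters_alt sentence
instance (sentence : String) (out : String) : Decidable (Spec_first_letters sentence out) := by unfold Spec_first_letters; infer_instance

-- ===== CLAIM (what is proved, stated in full; the proofs are below) =====
def Claim_equal_first_letters : Prop := ∀ (sentence : String), Dom_first_letters sentence → Spec_first_letters sentence (first_letters sentence)

-- ===== LEMMAS AND PROOFS =====

-- finishing A's fold from state (start, letters)
def finishA (p : List Char × List Char) : List Char :=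
  match p.1 with
  | [] => p.2
  | h :: _ => p.2 ++ [h]

theorem head?_toList_filterMap {α : Type} (t : List α) (ts : List (List α)) :
    t.head?.toList ++ ts.filterMap List.head? = (t :: ts).filterMap List.head? := by
  cases t <;> simp

theorem foldA_splitDelim (cs : List Char) :
    ∀ (start letters : List Char),
      finishA (cs.foldl firstLettersStep (start, letters)) =
        letters ++ ((start ++ (splitDelim cs).1).head?.toList
          ++ (splitDelim cs).2.filterMap List.head?) := by
  induction cs with
  | nil =>
    intro start letters
    cases start <;> simp [splitDelim, finishA]
  | cons c cs ih =>
    intro start letters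
    by_cases hd : c = ' ' ∨ c = '.'
    · cases start with
      | nil =>
        simp only [List.foldl_cons, firstLettersStep, if_pos hd, splitDelim, ih]
        simp [head?_toList_filterMap]
      | cons h t =>
        simp only [List.foldl_cons, firstLettersStep, if_pos hd, splitDelim, ih]
        simp [head?_toList_filterMap]
    · simp only [List.foldl_cons, firstLettersStep, if_neg hd, splitDelim, ih]
      simp

-- ===== VERDICT (by name: the statement is the Claim_ definition above) =====
theorem first_letters_spec : Claim_equal_first_letters := by
  intro s _
  unfold Spec_first_letters first_letters first_letters_alt
  have h := foldA_splitDelim s.toList [] []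
  simp only [List.nil_append] at h
  cases hst : s.toList.foldl firstLettersStep ([], []) with
  | mk a b =>
    rw [hst] at h
    cases ha : a with
    | nil =>
      simp only [finishA, ha] at h ⊢
      rw [h, ← head?_toList_filterMap]
    | cons x xs =>
      simp only [finishA, ha] at h
      simp only [ha]
      rw [h, ← head?_toList_filterMap]
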